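-- pv_equiv track=rewrite | github.com/SRendonn/analisis-diseno-algoritmos | modulo_7/src/2_cerca_de_la_familia.py | get_best_house
-- ===== SOURCE A (Python) =====
-- def partition(lista, low, high):
--     i = low - 1
--     pivot = lista[high]
--
--     for j in range(low, high):
--
--         if lista[j] <= pivot:
--             i += 1
--             # swap
--             lista[i], lista[j] = lista[j], lista[i]
--     lista[i + 1], lista[high] = lista[high], lista[i + 1]
--     return i + 1
--
-- def find_k(lista: list, low, high, k):
--     if low == high:
--         return lista[low]
--     else:
--         p_index = partition(lista, low, high)
--         p_value = lista[p_index]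
--         if k == p_index:
--             return p_value
--         elif k > p_index:
--             return find_k(lista, p_index + 1, high, k)
--         else:
--             return find_k(lista, low, p_index - 1, k)
--
-- def get_best_house(lista):
--     k = (len(lista) // 2)
--     if not len(lista) % 2:
--         k -= 1
--     best_house = find_k(lista, 0, len(lista) - 1, k)
--     dist = 0
--     for house in lista:
--         if house != best_house:
--             dist += abs(best_house - house)
--     return (best_house, dist)
-- ===== SOURCE B (Python) =====
-- def get_best_house(lista):
--     ordenadas = sorted(lista)
--     best_house = ordenadas[(len(lista) - 1) // 2]
--     return (best_house, sum(abs(best_house - house) for house in lista))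
-- ===== Notes on version B (the rewrite author's own statement) =====
-- stated objective: faster
-- what changed: Replaces the in-place Lomuto quickselect recursion with a single sort followed by picking the lower-median index (len-1)//2 and one linear pass summing distances.
import Mathlib
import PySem

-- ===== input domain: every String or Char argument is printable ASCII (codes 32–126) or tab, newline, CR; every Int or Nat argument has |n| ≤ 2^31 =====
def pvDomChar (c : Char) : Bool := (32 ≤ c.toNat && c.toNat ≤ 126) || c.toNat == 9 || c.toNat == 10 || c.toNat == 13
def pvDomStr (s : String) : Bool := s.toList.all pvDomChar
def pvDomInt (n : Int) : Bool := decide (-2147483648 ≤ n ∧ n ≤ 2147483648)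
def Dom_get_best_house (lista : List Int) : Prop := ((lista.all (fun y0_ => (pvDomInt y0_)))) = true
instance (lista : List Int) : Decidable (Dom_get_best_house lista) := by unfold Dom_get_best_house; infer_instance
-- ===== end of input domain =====

-- B replaces A's in-place Lomuto quickselect by sort + lower-median index (len-1)//2 + one linear distance pass;
-- Python A partially reorders `lista` IN PLACE (B does not mutate): the equivalence proved here is about the RETURN value only.

-- ===== PORT A =====
-- swap `lista[i], lista[j] = lista[j], lista[i]`; every index A uses is in range on inputs admitted by Pre_,
-- where the total forms pyGetD/pySetD coincide with Python's indexing
def pySwap (l : List Int) (a b : Int) : List Int :=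
  PySem.List.pySetD (PySem.List.pySetD l a (PySem.List.pyGetD l b 0)) b (PySem.List.pyGetD l a 0)

def partition (l : List Int) (low high : Int) : List Int × Int :=
  let pivot := PySem.List.pyGetD l high 0
  let st := (PySem.List.pyRange low high 1).foldl
    (fun (st : List Int × Int) j =>
      if PySem.List.pyGetD st.1 j 0 ≤ pivot then (pySwap st.1 (st.2 + 1) j, st.2 + 1) else st)
    (l, low - 1)
  (pySwap st.1 (st.2 + 1) high, st.2 + 1)

-- Python's find_k mutates `lista`; the port threads the list and returns (list, value).
-- fuel is a totality guard only: the recursion depth is at most the list length, so it never runs out under Pre_.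
def find_k (fuel : Nat) (l : List Int) (low high k : Int) : List Int × Int :=
  match fuel with
  | 0 => (l, 0)
  | fuel' + 1 =>
    if low = high then (l, PySem.List.pyGetD l low 0)
    else
      let pr := partition l low high
      let p_value := PySem.List.pyGetD pr.1 pr.2 0
      if k = pr.2 then (pr.1, p_value)
      else if k > pr.2 then find_k fuel' pr.1 (pr.2 + 1) high k
      else find_k fuel' pr.1 low (pr.2 - 1) k

def get_best_house (lista : List Int) : Int × Int :=
  let k0 := PySem.Int.floordiv (PySem.List.len lista) 2
  let k := if PySem.Int.mod (PySem.List.len lista) 2 = 0 then k0 - 1 else k0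
  let r := find_k lista.length lista 0 (PySem.List.len lista - 1) k
  let dist := r.1.foldl (fun d house => if house ≠ r.2 then d + |r.2 - house| else d) 0
  (r.2, dist)

-- ===== PORT B =====
def get_best_house_alt (lista : List Int) : Int × Int :=
  let ordenadas := PySem.List.sorted lista (fun x => x) false
  let best := PySem.List.pyGetD ordenadas (PySem.Int.floordiv (PySem.List.len lista - 1) 2) 0
  (best, lista.foldl (fun d house => d + |best - house|) 0)

-- ===== PRECONDITION & SPEC =====
-- Pre_ excludes only the empty list, on which Python A raises IndexError (`lista[high]` with high = -1).
def Pre_get_best_house (lista : List Int) : Prop := lista ≠ []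
instance (lista : List Int) : Decidable (Pre_get_best_house lista) := by unfold Pre_get_best_house; infer_instance
def pvWitness_get_best_house : List Int := ([3, 1, 2])

def Spec_get_best_house (lista : List Int) (out : Int × Int) : Prop := out = get_best_house_alt lista
instance (lista : List Int) (out : Int × Int) : Decidable (Spec_get_best_house lista out) := by unfold Spec_get_best_house; infer_instance

-- ===== CLAIM (what is proved, stated in full; the proofs are below) =====
def Claim_equal_get_best_house : Prop := ∀ (lista : List Int), Dom_get_best_house lista → Pre_get_best_house lista → Spec_get_best_house lista (get_best_house lista)

-- ===== LEMMAS AND PROOFS =====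

-- functional mirror of Lomuto's inner loop on the segment: an element ≤ pivot joins the left block and the
-- right block rotates left one place (the effect of the swap); an element > pivot joins the right block
def rotL (r : List Int) : List Int := r.drop 1 ++ r.take 1

def lomStep (x : Int) (st : List Int × List Int) (s : Int) : List Int × List Int :=
  if s ≤ x then (st.1 ++ [s], rotL st.2) else (st.1, st.2 ++ [s])

def sortI (S : List Int) : List Int := PySem.List.sorted S (fun x => x) false

lemma length_rotL (r : List Int) : (rotL r).length = r.length := by
  simp [rotL]; omega

lemma rotL_perm (r : List Int) : (rotL r).Perm r := by
  simpa [rotL] using (List.perm_append_comm (l₁ := r.drop 1) (l₂ := r.take 1)).trans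
    (by rw [List.take_append_drop])

lemma pyGetD_at (P Q : List Int) (u : Int) (i : Int) (hi : i = ↑P.length) :
    PySem.List.pyGetD (P ++ u :: Q) i 0 = u := by
  subst hi; simp [List.getD]

lemma pySetD_at (P Q : List Int) (u w : Int) (i : Int) (hi : i = ↑P.length) :
    PySem.List.pySetD (P ++ u :: Q) i w = P ++ w :: Q := by
  subst hi; simp

lemma pySwap_self (P Q : List Int) (u : Int) (a b : Int)
    (ha : a = ↑P.length) (hb : b = ↑P.length) :
    pySwap (P ++ u :: Q) a b = P ++ u :: Q := by
  subst ha hb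
  simp only [pySwap, pyGetD_at _ _ _ _ rfl, pySetD_at _ _ _ _ _ rfl]

lemma pySwap_eq (P M Q : List Int) (u v : Int) (a b : Int)
    (ha : a = ↑P.length) (hb : b = ↑P.length + ↑M.length + 1) :
    pySwap (P ++ u :: (M ++ v :: Q)) a b = P ++ v :: (M ++ u :: Q) := by
  subst ha hb
  have hb' : (↑P.length + ↑M.length + 1 : Int) = ((P ++ u :: M).length : Int) := by
    push_cast [List.length_append, List.length_cons, List.length_nil, length_rotL]; omega
  have hb2 : (↑P.length + ↑M.length + 1 : Int) = ((P ++ v :: M).length : Int) := by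
    push_cast [List.length_append, List.length_cons, List.length_nil, length_rotL]; omega
  have hget_b : PySem.List.pyGetD (P ++ u :: (M ++ v :: Q)) (↑P.length + ↑M.length + 1) 0 = v := by
    rw [show P ++ u :: (M ++ v :: Q) = (P ++ u :: M) ++ v :: Q by simp]
    exact pyGetD_at _ _ _ _ (by simpa using hb')
  have hget_a : PySem.List.pyGetD (P ++ u :: (M ++ v :: Q)) (↑P.length) 0 = u :=
    pyGetD_at _ _ _ _ rfl
  simp only [pySwap, hget_b, hget_a]
  rw [pySetD_at _ _ _ _ _ rfl]
  rw [show P ++ v :: (M ++ v :: Q) = (P ++ v :: M) ++ v :: Q by simp]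
  rw [pySetD_at _ _ _ _ _ hb2]
  simp

lemma partition_loop (x : Int) (A B : List Int) : ∀ (rest L R : List Int) (lo hi : Int),
    lo = ↑(A.length + L.length + R.length) →
    hi = ↑(A.length + L.length + R.length + rest.length) →
    (PySem.List.pyRange lo hi 1).foldl
      (fun (st : List Int × Int) j =>
        if PySem.List.pyGetD st.1 j 0 ≤ x then (pySwap st.1 (st.2 + 1) j, st.2 + 1) else st)
      (A ++ L ++ R ++ rest ++ [x] ++ B, (↑(A.length + L.length) : Int) - 1)
    = (A ++ (rest.foldl (lomStep x) (L, R)).1 ++ (rest.foldl (lomStep x) (L, R)).2 ++ [x] ++ B,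
        (↑(A.length + (rest.foldl (lomStep x) (L, R)).1.length) : Int) - 1) := by
  intro rest
  induction rest with
  | nil =>
      intro L R lo hi hlo hhi
      rw [PySem.List.pyRange_one_eq_nil (by subst hlo hhi; simp)]
      simp
  | cons s rest ih =>
      intro L R lo hi hlo hhi
      rw [PySem.List.pyRange_one_cons (by subst hlo hhi; push_cast [List.length_append, List.length_cons, List.length_nil, length_rotL]; omega)]
      rw [List.foldl_cons]
      have hget : PySem.List.pyGetD (A ++ L ++ R ++ (s :: rest) ++ [x] ++ B) lo 0 = s := by
        rw [show A ++ L ++ R ++ (s :: rest) ++ [x] ++ B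
            = (A ++ L ++ R) ++ s :: (rest ++ [x] ++ B) by simp]
        exact pyGetD_at _ _ _ _ (by subst hlo; push_cast [List.length_append, List.length_cons, List.length_nil, length_rotL]; omega)
      by_cases hs : s ≤ x
      · simp only [hget, hs, if_pos]
        have hstep : pySwap (A ++ L ++ R ++ (s :: rest) ++ [x] ++ B) ((↑(A.length + L.length) : Int) - 1 + 1) lo
            = A ++ (L ++ [s]) ++ rotL R ++ rest ++ [x] ++ B := by
          rcases R with _ | ⟨r0, r'⟩
          · rw [show A ++ L ++ ([] : List Int) ++ (s :: rest) ++ [x] ++ B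
                = (A ++ L) ++ s :: (rest ++ [x] ++ B) by simp]
            rw [pySwap_self (A ++ L) _ s _ _ (by push_cast [List.length_append, List.length_cons, List.length_nil, length_rotL]; omega)
                (by subst hlo; push_cast [List.length_append, List.length_cons, List.length_nil, length_rotL]; omega)]
            simp [rotL]
          · rw [show A ++ L ++ (r0 :: r') ++ (s :: rest) ++ [x] ++ B
                = (A ++ L) ++ r0 :: (r' ++ s :: (rest ++ [x] ++ B)) by simp]
            rw [pySwap_eq (A ++ L) r' _ r0 s _ _ (by push_cast [List.length_append, List.length_cons, List.length_nil, length_rotL]; omega)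
                (by subst hlo; push_cast [List.length_append, List.length_cons, List.length_nil, length_rotL]; omega)]
            simp [rotL]
        rw [hstep]
        have hsnd : ((↑(A.length + L.length) : Int) - 1 + 1) = (↑(A.length + (L ++ [s]).length) : Int) - 1 := by
          push_cast [List.length_append, List.length_cons, List.length_nil, length_rotL]; omega
        rw [hsnd]
        rw [ih (L ++ [s]) (rotL R) (lo + 1) hi
          (by subst hlo; push_cast [List.length_append, List.length_cons, List.length_nil, length_rotL]; omega)
          (by subst hhi; push_cast [List.length_append, List.length_cons, List.length_nil, length_rotL]; omega)]
        simp [lomStep, hs]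
      · simp only [hget, hs, if_neg, not_false_iff]
        have hre : A ++ L ++ R ++ (s :: rest) ++ [x] ++ B = A ++ L ++ (R ++ [s]) ++ rest ++ [x] ++ B := by
          simp
        rw [hre]
        rw [ih L (R ++ [s]) (lo + 1) hi
          (by subst hlo; push_cast [List.length_append, List.length_cons, List.length_nil, length_rotL]; omega)
          (by subst hhi; push_cast [List.length_append, List.length_cons, List.length_nil, length_rotL]; omega)]
        simp [lomStep, hs]

lemma lom_fst (x : Int) (S : List Int) : ∀ L R : List Int,
    (S.foldl (lomStep x) (L, R)).1 = L ++ S.filter (fun s => decide (s ≤ x)) := by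
  induction S with
  | nil => simp
  | cons s S ih =>
      intro L R
      by_cases h : s ≤ x <;> simp [lomStep, h, ih]

lemma lom_snd_perm (x : Int) (S : List Int) : ∀ L R : List Int,
    ((S.foldl (lomStep x) (L, R)).2).Perm (R ++ S.filter (fun s => !decide (s ≤ x))) := by
  induction S with
  | nil => simp
  | cons s S ih =>
      intro L R
      by_cases h : s ≤ x
      · simp only [List.foldl_cons, lomStep, h, if_pos, List.filter_cons]
        simp only [h, decide_true, Bool.not_true, if_neg, Bool.false_eq_true, not_false_iff]
        exact (ih _ _).trans ((rotL_perm R).append_right _)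
      · simp only [List.foldl_cons, lomStep, h, if_neg, not_false_iff, List.filter_cons]
        simp only [h, decide_false, Bool.not_false, if_pos]
        refine (ih _ _).trans ?_
        have : (R ++ [s]).Perm (s :: R) := by
          simpa using (List.perm_append_comm (l₁ := R) (l₂ := [s]))
        simpa using this.append_right (S.filter (fun s => !decide (s ≤ x)))

lemma lom_len (x : Int) (S : List Int) : ∀ L R : List Int,
    (S.foldl (lomStep x) (L, R)).1.length + (S.foldl (lomStep x) (L, R)).2.length
      = L.length + R.length + S.length := by
  induction S with
  | nil => simp
  | cons s S ih =>
      intro L R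
      by_cases h : s ≤ x <;>
        simp only [List.foldl_cons, lomStep, h, if_pos, if_neg, not_false_iff, ih] <;>
        simp [length_rotL] <;> omega

lemma partition_spec (A S B : List Int) (x : Int) (lo hi : Int)
    (hlo : lo = ↑A.length) (hhi : hi = ↑(A.length + S.length)) :
    partition (A ++ (S ++ [x]) ++ B) lo hi
      = (A ++ (S.foldl (lomStep x) ([], [])).1 ++ [x] ++ rotL (S.foldl (lomStep x) ([], [])).2 ++ B,
          ↑(A.length + (S.foldl (lomStep x) ([], [])).1.length)) := by
  subst hlo hhi
  have hpiv : PySem.List.pyGetD (A ++ (S ++ [x]) ++ B) (↑(A.length + S.length)) 0 = x := by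
    rw [show A ++ (S ++ [x]) ++ B = (A ++ S) ++ x :: B by simp]
    exact pyGetD_at _ _ _ _ (by push_cast [List.length_append]; ring)
  have hloop := partition_loop x A B S [] [] (↑A.length) (↑(A.length + S.length))
      (by simp) (by simp)
  rw [show A ++ [] ++ [] ++ S ++ [x] ++ B = A ++ (S ++ [x]) ++ B by simp,
      show ((↑(A.length + ([] : List Int).length) : Int) - 1) = (↑A.length : Int) - 1 by simp]
    at hloop
  simp only [partition, hpiv, hloop]
  rcases hF : S.foldl (lomStep x) ([], []) with ⟨L, R⟩
  have hlen : L.length + R.length = S.length := by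
    have := lom_len x S [] []; rw [hF] at this; simpa using this
  rcases R with _ | ⟨r0, r'⟩
  · rw [show A ++ L ++ ([] : List Int) ++ [x] ++ B = (A ++ L) ++ x :: B by simp]
    rw [pySwap_self (A ++ L) B x _ _ (by push_cast [List.length_append]; ring)
        (by push_cast [List.length_append, List.length_nil] at hlen ⊢; omega)]
    simp [rotL]
  · rw [show A ++ L ++ (r0 :: r') ++ [x] ++ B = (A ++ L) ++ r0 :: (r' ++ x :: B) by simp]
    rw [pySwap_eq (A ++ L) r' B r0 x _ _ (by push_cast [List.length_append]; ring)
        (by push_cast [List.length_append, List.length_cons, List.length_nil] at hlen ⊢; omega)]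
    simp [rotL]

lemma sortI_perm_eq {S T : List Int} (h : T.Perm S) : sortI T = sortI S :=
  PySem.List.sorted_eq_sorted_of_perm T S (fun x => x) (fun a b h => h) h

lemma sortI_split (L R : List Int) (x : Int) (hL : ∀ a ∈ L, a ≤ x) (hR : ∀ b ∈ R, x < b) :
    sortI (L ++ [x] ++ R) = sortI L ++ x :: sortI R := by
  apply PySem.List.sorted_id_eq_of_perm_of_pairwise
  · have h1 : (sortI L ++ x :: sortI R).Perm (L ++ x :: R) :=
      List.Perm.append (PySem.List.sorted_perm L (fun x => x) false)
        (List.Perm.cons x (PySem.List.sorted_perm R (fun x => x) false))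
    simpa using h1
  · rw [List.pairwise_append]
    refine ⟨by simpa using PySem.List.sorted_pairwise (xs := L) (key := fun x => x), ?_, ?_⟩
    · rw [List.pairwise_cons]
      refine ⟨fun b hb => le_of_lt (hR b (by rw [sortI] at hb; exact (PySem.List.mem_sorted _ _ _ _).mp hb)), ?_⟩
      simpa using PySem.List.sorted_pairwise (xs := R) (key := fun x => x)
    · intro a ha b hb
      have ha' : a ≤ x := hL a (by rw [sortI] at ha; exact (PySem.List.mem_sorted _ _ _ _).mp ha)
      rcases List.mem_cons.mp hb with rfl | hb'
      · exact ha'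
      · exact le_trans ha' (le_of_lt (hR b (by rw [sortI] at hb'; exact (PySem.List.mem_sorted _ _ _ _).mp hb')))

lemma getD_at (P Q : List Int) (u : Int) : (P ++ u :: Q).getD P.length 0 = u := by
  simp [List.getD]

lemma getD_append_left (P Q : List Int) (n : Nat) (h : n < P.length) :
    (P ++ Q).getD n 0 = P.getD n 0 := by
  simp [List.getD, List.getElem?_append_left h]

lemma getD_append_right_cons (P Q : List Int) (u : Int) (n : Nat) (h : P.length < n) :
    (P ++ u :: Q).getD n 0 = Q.getD (n - P.length - 1) 0 := by
  simp only [List.getD]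
  rw [List.getElem?_append_right (by omega)]
  rw [show n - P.length = (n - P.length - 1) + 1 by omega]
  simp

lemma find_k_sel : ∀ (fuel : Nat) (S A B : List Int) (k : Nat) (lo hi kk : Int),
    S ≠ [] → S.length ≤ fuel → A.length ≤ k → k < A.length + S.length →
    lo = ↑A.length → hi = ↑(A.length + S.length - 1) → kk = ↑k →
    ∃ T : List Int, T.Perm S ∧
      find_k fuel (A ++ S ++ B) lo hi kk = (A ++ T ++ B, (sortI S).getD (k - A.length) 0) := by
  intro fuel
  induction fuel with
  | zero =>
      intro S A B k lo hi kk hS hf _ _ _ _ _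
      rcases S with _ | ⟨s, S'⟩
      · exact absurd rfl hS
      · simp at hf
  | succ f ih =>
      intro S A B k lo hi kk hS hf hk1 hk2 hlo hhi hkk
      rcases List.eq_nil_or_concat S with rfl | ⟨S0, x, rfl⟩
      · exact absurd rfl hS
      simp only [List.concat_eq_append] at hS hf hk1 hk2 hlo hhi hkk ⊢
      simp only [List.length_append, List.length_cons, List.length_nil] at hf hk2 hhi
      rcases S0 with _ | ⟨s0, S0'⟩
      · -- singleton segment
        refine ⟨[x], List.Perm.refl _, ?_⟩
        simp only [find_k]
        rw [if_pos (by subst hlo hhi; simp)]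
        have hkA : k = A.length := by simp at hk2; omega
        rw [show A ++ ([] ++ [x]) ++ B = A ++ x :: B by simp]
        rw [pyGetD_at A B x lo hlo]
        have hsx : sortI ([] ++ [x]) = [x] := by
          rw [show ([] ++ [x] : List Int) = [x] by simp, sortI]
          exact PySem.List.sorted_eq_self_of_pairwise _ _ (by simp)
        rw [hsx, hkA]
        simp
      · -- segment length ≥ 2
        generalize hS0 : (s0 :: S0' : List Int) = S0 at *
        have hS0ne : S0.length ≥ 1 := by rw [← hS0]; simp
        simp only [find_k]
        rw [if_neg (by subst hlo hhi; omega)]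
        have hpart := partition_spec A S0 B x lo hi hlo (by subst hhi; push_cast; omega)
        rw [hpart]
        dsimp only
        set L := (S0.foldl (lomStep x) ([], [])).1 with hLdef
        set R := (S0.foldl (lomStep x) ([], [])).2 with hRdef
        set R' := rotL R with hR'def
        have hLf : L = S0.filter (fun s => decide (s ≤ x)) := by
          rw [hLdef]; simpa using lom_fst x S0 [] []
        have hRp : R.Perm (S0.filter (fun s => !decide (s ≤ x))) := by
          rw [hRdef]; simpa using lom_snd_perm x S0 [] []
        have hR'p : R'.Perm (S0.filter (fun s => !decide (s ≤ x))) := (rotL_perm R).trans hRp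
        have hLle : ∀ a ∈ L, a ≤ x := by
          intro a ha; rw [hLf, List.mem_filter] at ha; exact of_decide_eq_true ha.2
        have hR'gt : ∀ b ∈ R', x < b := by
          intro b hb
          have hm := hR'p.mem_iff.mp hb
          rw [List.mem_filter] at hm
          have h2 := hm.2
          simp only [Bool.not_eq_true', decide_eq_false_iff_not] at h2
          omega
        have hLR : L.length + R.length = S0.length := by
          have h := lom_len x S0 [] []
          rw [← hLdef, ← hRdef] at h; simpa using h
        have hR'len : R'.length = R.length := by rw [hR'def]; exact length_rotL R
        have hperm : (L ++ [x] ++ R').Perm (S0 ++ [x]) := by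
          have p1 : (L ++ R').Perm S0 := by
            rw [hLf]
            exact (List.Perm.append_left _ hR'p).trans (List.filter_append_perm _ S0)
          have p2 : (L ++ [x] ++ R').Perm ((L ++ R') ++ [x]) := by
            rw [List.append_assoc, List.append_assoc]
            exact List.Perm.append_left L List.perm_append_comm
          exact p2.trans (p1.append_right [x])
        have hsort : sortI (S0 ++ [x]) = sortI L ++ x :: sortI R' := by
          rw [← sortI_perm_eq hperm, sortI_split L R' x hLle hR'gt]
        have hsLlen : (sortI L).length = L.length := by
          rw [sortI]; exact PySem.List.length_sorted L _ false
        have hpv : PySem.List.pyGetD (A ++ L ++ [x] ++ R' ++ B) (↑(A.length + L.length)) 0 = x := by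
          rw [show A ++ L ++ [x] ++ R' ++ B = (A ++ L) ++ x :: (R' ++ B) by simp]
          exact pyGetD_at _ _ _ _ (by push_cast [List.length_append]; ring)
        rw [hpv]
        rcases lt_trichotomy k (A.length + L.length) with hklt | hkeq | hkgt
        · -- recurse left
          rw [if_neg (by subst hkk; omega), if_neg (by subst hkk; omega)]
          have hL1 : 1 ≤ L.length := by omega
          obtain ⟨T', hT', heq⟩ := ih L A ([x] ++ R' ++ B) k lo (↑(A.length + L.length) - 1) kk
            (by intro h; rw [h] at hL1; simp at hL1)
            (by omega) hk1 (by omega) hlo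
            (by push_cast; omega) hkk
          rw [show A ++ L ++ [x] ++ R' ++ B = A ++ L ++ ([x] ++ R' ++ B) by simp, heq]
          refine ⟨T' ++ [x] ++ R', ?_, ?_⟩
          · exact ((hT'.append_right [x]).append_right R').trans hperm
          · rw [hsort]
            rw [getD_append_left _ _ _ (by rw [hsLlen]; omega)]
            simp
        · -- found
          rw [if_pos (by subst hkk; omega)]
          refine ⟨L ++ [x] ++ R', hperm, ?_⟩
          rw [hsort]
          rw [show k - A.length = (sortI L).length by rw [hsLlen]; omega]
          rw [getD_at]
          simp
        · -- recurse right
          rw [if_neg (by subst hkk; omega), if_pos (by subst hkk; omega)]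
          have hR1 : 1 ≤ R'.length := by omega
          obtain ⟨T', hT', heq⟩ := ih R' (A ++ L ++ [x]) B k (↑(A.length + L.length) + 1) hi kk
            (by intro h; rw [h] at hR1; simp at hR1)
            (by omega)
            (by push_cast [List.length_append, List.length_cons, List.length_nil]; omega)
            (by push_cast [List.length_append, List.length_cons, List.length_nil]; omega)
            (by push_cast [List.length_append, List.length_cons, List.length_nil]; omega)
            (by subst hhi; push_cast [List.length_append, List.length_cons, List.length_nil]; omega) hkk
          rw [show A ++ L ++ [x] ++ R' ++ B = (A ++ L ++ [x]) ++ R' ++ B by simp, heq]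
          refine ⟨L ++ [x] ++ T', ?_, ?_⟩
          · exact ((hT'.append_left _)).trans hperm
          · rw [hsort]
            rw [getD_append_right_cons _ _ _ _ (by rw [hsLlen]; omega), hsLlen]
            rw [show k - A.length - L.length - 1 = k - (A ++ L ++ [x]).length by
              push_cast [List.length_append, List.length_cons, List.length_nil]; omega]
            simp


lemma foldl_dist_a (best : Int) : ∀ (l : List Int) (d : Int),
    l.foldl (fun d h => if h ≠ best then d + |best - h| else d) d
      = d + (l.map (fun h => |best - h|)).sum := by
  intro l
  induction l with
  | nil => simp
  | cons h l ih =>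
      intro d
      simp only [List.foldl_cons, List.map_cons, List.sum_cons]
      by_cases hh : h = best
      · rw [if_neg (not_not_intro hh), ih, hh]
        simp
      · rw [if_pos hh, ih]
        ring

lemma foldl_dist_b (best : Int) : ∀ (l : List Int) (d : Int),
    l.foldl (fun d h => d + |best - h|) d = d + (l.map (fun h => |best - h|)).sum := by
  intro l
  induction l with
  | nil => simp
  | cons h l ih => intro d; simp [ih]; ring

-- ===== VERDICT (by name: the statement is the Claim_ definition above) =====
theorem get_best_house_spec : Claim_equal_get_best_house := by
  unfold Claim_equal_get_best_house
  intro lista _ hpre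
  unfold Spec_get_best_house
  have hn : 1 ≤ lista.length := List.length_pos_of_ne_nil hpre
  have hk : (if PySem.Int.mod (↑lista.length) 2 = 0
        then PySem.Int.floordiv (↑lista.length) 2 - 1
        else PySem.Int.floordiv (↑lista.length) 2) = (↑((lista.length - 1) / 2) : Int) := by
    rw [show (2 : Int) = ((2 : Nat) : Int) by norm_num, PySem.Int.mod_natCast,
        PySem.Int.floordiv_natCast]
    by_cases h2 : lista.length % 2 = 0
    · rw [if_pos (by exact_mod_cast congrArg (Nat.cast : Nat → Int) h2)]
      have : lista.length / 2 - 1 = (lista.length - 1) / 2 := by omega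
      push_cast
      omega
    · rw [if_neg (by intro h; exact h2 (by exact_mod_cast h))]
      congr 1
      omega
  obtain ⟨T, hT, heq⟩ := find_k_sel lista.length lista [] [] ((lista.length - 1) / 2)
      0 (↑lista.length - 1) (↑((lista.length - 1) / 2)) hpre (le_refl _)
      (by simp) (by simp; omega) (by simp) (by simp; push_cast; omega) rfl
  simp only [List.append_nil, List.nil_append, List.length_nil, Nat.sub_zero] at heq
  simp only [get_best_house, get_best_house_alt, PySem.List.len_eq]
  rw [hk, heq]
  have hb : PySem.Int.floordiv ((↑lista.length : Int) - 1) 2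
      = (↑((lista.length - 1) / 2) : Int) := by
    rw [show ((↑lista.length : Int) - 1) = ((lista.length - 1 : Nat) : Int) by push_cast; omega,
        show (2 : Int) = ((2 : Nat) : Int) by norm_num, PySem.Int.floordiv_natCast]
  rw [hb]
  simp only [PySem.List.pyGetD_natCast]
  rw [foldl_dist_a, foldl_dist_b]
  have hsum : (T.map (fun h => |(sortI lista).getD ((lista.length - 1) / 2) 0 - h|)).sum
      = (lista.map (fun h => |(sortI lista).getD ((lista.length - 1) / 2) 0 - h|)).sum :=
    (hT.map _).sum_eq
  simp only [sortI] at hsum ⊢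
  rw [hsum]
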